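-- pv_equiv track=rewrite | github.com/zsorens/Capstone-Python-Scripts | detect_text.py | any_text_triggering
-- ===== SOURCE A (Python) =====
-- def any_text_triggering(strings: list, trigger_phrases:list)-> bool:
--     if type(strings) != list: # Type checking
--         if(type(strings) == str): # Allowing for singular string checkking
--             strings = [strings]
--         else:
--             raise TypeError("any_text_triggering() was not provided a string or a list")
--     strings = set([x.lower() for x in strings]) # Get all unique, lower cases strings
--     trigger_phrases = set([x.lower() for x in trigger_phrases]) # same as above
--     for phrase in trigger_phrases: # Combinatory checking.
--         for string in strings:
--             if phrase in string:
--                 return True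
--     return False
-- ===== SOURCE B (Python) =====
-- def any_text_triggering(strings: list, trigger_phrases: list) -> bool:
--     # Positional multi-pattern scan: sweep each string once, testing every
--     # alignment against all patterns with startswith.
--     patterns = [p.lower() for p in trigger_phrases]
--     for s in strings:
--         text = s.lower()
--         for i in range(len(text) + 1):
--             if any(text.startswith(p, i) for p in patterns):
--                 return True
--     return False
-- ===== Notes on version B (the rewrite author's own statement) =====
-- stated objective: alternative
-- what changed: Replaces the set-building pair-of-'in'-loops with a positional multi-pattern scanner: patterns are lowercased once, then each string is swept left-to-right and every alignment is tested against all patterns with startswith; no sets are built and the loop nesting is string-outer/position/pattern instead of phrase-outer/string with repeated full substring searches.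
import Mathlib
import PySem

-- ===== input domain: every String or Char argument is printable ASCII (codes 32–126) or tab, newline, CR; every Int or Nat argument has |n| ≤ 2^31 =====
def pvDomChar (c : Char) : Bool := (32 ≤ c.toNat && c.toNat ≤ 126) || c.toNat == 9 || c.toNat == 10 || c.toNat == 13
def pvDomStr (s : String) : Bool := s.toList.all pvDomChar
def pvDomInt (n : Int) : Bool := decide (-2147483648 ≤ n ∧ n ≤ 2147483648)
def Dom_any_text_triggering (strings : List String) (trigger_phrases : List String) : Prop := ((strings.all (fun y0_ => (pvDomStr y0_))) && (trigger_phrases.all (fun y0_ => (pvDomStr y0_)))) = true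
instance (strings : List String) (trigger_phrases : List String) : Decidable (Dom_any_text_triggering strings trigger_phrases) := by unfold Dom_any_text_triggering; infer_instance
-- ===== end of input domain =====

-- B changes structure only: a positional multi-pattern scan instead of A's set-building
-- nested 'in' loops; same Boolean result (objective: alternative, not faster).

-- ===== PORT A =====
-- strings = set([x.lower() for x in strings]); trigger_phrases likewise;
-- then the nested for-loops with early 'return True' = short-circuit List.any over the sets.
def any_text_triggering (strings : List String) (trigger_phrases : List String) : Bool :=
  let strs := PySem.Set.ofList (strings.map (fun x => PySem.Str.lower x))
  let trig := PySem.Set.ofList (trigger_phrases.map (fun x => PySem.Str.lower x))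
  trig.any (fun phrase => strs.any (fun s => PySem.Str.isIn phrase s))

-- ===== PORT B =====
-- patterns lowercased once; each string swept once; at each alignment i the Python test
-- text.startswith(p, i) (0 ≤ i ≤ len(text)) is exactly 'p is a prefix of text dropped i chars'.
def any_text_triggering_alt (strings : List String) (trigger_phrases : List String) : Bool :=
  let patterns := trigger_phrases.map (fun p => (PySem.Str.lower p).toList)
  strings.any (fun s =>
    let text := (PySem.Str.lower s).toList
    (List.range (text.length + 1)).any (fun i =>
      patterns.any (fun p => PySem.Chars.startswith (text.drop i) p)))

-- ===== PRECONDITION & SPEC =====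
def Spec_any_text_triggering (strings : List String) (trigger_phrases : List String) (out : Bool) : Prop := out = any_text_triggering_alt strings trigger_phrases
instance (strings : List String) (trigger_phrases : List String) (out : Bool) : Decidable (Spec_any_text_triggering strings trigger_phrases out) := by unfold Spec_any_text_triggering; infer_instance

-- ===== CLAIM (what is proved, stated in full; the proofs are below) =====
def Claim_equal_any_text_triggering : Prop := ∀ (strings : List String) (trigger_phrases : List String), Dom_any_text_triggering strings trigger_phrases → Spec_any_text_triggering strings trigger_phrases (any_text_triggering strings trigger_phrases)

-- ===== LEMMAS AND PROOFS =====

-- the bounded alignment scan of one string equals 'some pattern occurs as an infix'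
theorem scan_eq_exists_infix (t : List Char) (pats : List (List Char)) :
    (∃ i ∈ List.range (t.length + 1), ∃ p ∈ pats,
      PySem.Chars.startswith (t.drop i) p = true)
    ↔ ∃ p ∈ pats, p <:+: t := by
  simp only [List.mem_range, PySem.Chars.startswith_iff]
  constructor
  · rintro ⟨i, _, p, hp, hpre⟩
    exact ⟨p, hp, (PySem.Chars.isIn_iff_infix p t).1
      ((PySem.Chars.exists_prefix_drop_iff_isIn p t).1 ⟨i, hpre⟩)⟩
  · rintro ⟨p, hp, hinf⟩
    obtain ⟨i, hpre⟩ := (PySem.Chars.exists_prefix_drop_iff_isIn p t).2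
      ((PySem.Chars.isIn_iff_infix p t).2 hinf)
    by_cases hi : i ≤ t.length
    · exact ⟨i, by omega, p, hp, hpre⟩
    · refine ⟨t.length, by omega, p, hp, ?_⟩
      rw [List.drop_length]
      rw [List.drop_eq_nil_of_le (by omega)] at hpre
      exact hpre

theorem any_text_triggering_spec : Claim_equal_any_text_triggering := by
  intro strings trigger_phrases _
  unfold Spec_any_text_triggering any_text_triggering any_text_triggering_alt
  rw [Bool.eq_iff_iff]
  simp only [List.any_eq_true]
  constructor <;> intro h
  · obtain ⟨phrase, hph, s, hs, hin⟩ := by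
      simpa only [List.any_eq_true, PySem.Set.mem_ofList, List.mem_map] using h
    obtain ⟨p0, hp0, rfl⟩ := hph
    obtain ⟨s0, hs0, rfl⟩ := hs
    refine ⟨s0, hs0, ?_⟩
    rw [scan_eq_exists_infix]
    exact ⟨_, List.mem_map_of_mem hp0, (PySem.Str.isIn_iff_infix _ _).1 hin⟩
  · obtain ⟨s0, hs0, hscan⟩ := h
    rw [scan_eq_exists_infix] at hscan
    obtain ⟨p, hp, hinf⟩ := hscan
    obtain ⟨p0, hp0, rfl⟩ := List.mem_map.1 hp
    simp only [PySem.Set.mem_ofList, List.mem_map]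
    exact ⟨_, ⟨p0, hp0, rfl⟩, _, ⟨s0, hs0, rfl⟩, (PySem.Str.isIn_iff_infix _ _).2 hinf⟩
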